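-- pv_equiv track=rewrite | github.com/deniseli/StrunkAndWhiteLinter | scripts/textCleaning.py | is_numeric_chapter_title
-- ===== SOURCE A (Python) =====
-- def is_numeric_chapter_title(text):
--     """Returns whether the line is a roman numeral chapter title"""
--     split = text.split(".")
--     if len(split) != 2:
--         return False
--     for c in split[0]:
--         if c not in ["I", "V", "X"]:
--             return False
--     return True
-- ===== SOURCE B (Python) =====
-- def is_numeric_chapter_title(text):
--     """Returns whether the line is a roman numeral chapter title"""
--     seen_dot = False
--     for c in text:
--         if not seen_dot:
--             if c == ".":
--                 seen_dot = True
--             elif c not in "IVX":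
--                 return False
--         elif c == ".":
--             return False
--     return seen_dot
-- ===== Notes on version B (the rewrite author's own statement) =====
-- stated objective: alternative
-- what changed: Instead of splitting the text on the dot into pieces, checking the piece count and then looping over the first piece, B runs a single-pass two-state automaton (seen_dot flag) over the characters with early exit, building no intermediate lists.
import Mathlib
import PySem

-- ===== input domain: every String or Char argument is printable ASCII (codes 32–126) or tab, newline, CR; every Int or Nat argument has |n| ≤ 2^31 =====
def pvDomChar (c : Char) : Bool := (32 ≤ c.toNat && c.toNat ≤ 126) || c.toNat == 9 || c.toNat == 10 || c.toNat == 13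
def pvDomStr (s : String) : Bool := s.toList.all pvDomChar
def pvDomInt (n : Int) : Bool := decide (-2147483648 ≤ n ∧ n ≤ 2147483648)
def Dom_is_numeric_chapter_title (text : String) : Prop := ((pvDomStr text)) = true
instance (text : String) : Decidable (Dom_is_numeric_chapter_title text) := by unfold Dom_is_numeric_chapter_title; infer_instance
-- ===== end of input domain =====

-- B replaces A's split-into-pieces / piece-count check / loop over the first piece by a
-- single-pass two-state automaton (seen_dot flag) with early exit; same O(n) cost, no speed claim.

-- ===== PORT A =====
-- the 'for c in split[0]: if c not in ["I","V","X"]: return False / return True' loop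
def pvLoopA : List Char → Bool
  | [] => true
  | c :: rest => if c ∉ (['I', 'V', 'X'] : List Char) then false else pvLoopA rest

def is_numeric_chapter_title (text : String) : Bool :=
  let split := PySem.Chars.splitOn text.toList ['.']
  if split.length ≠ 2 then false
  else pvLoopA (PySem.List.pyGetD split 0 [])

-- ===== PORT B =====
-- the 'for c in text' loop carrying the seen_dot flag; 'c not in "IVX"' on a single char c
-- is membership of c in the chars of "IVX", i.e. c ∉ ['I','V','X'] (exact)
def pvAltLoop : List Char → Bool → Bool
  | [], seen_dot => seen_dot
  | c :: rest, seen_dot =>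
    if seen_dot = false then
      if c = '.' then pvAltLoop rest true
      else if c ∉ (['I', 'V', 'X'] : List Char) then false
      else pvAltLoop rest false
    else
      if c = '.' then false
      else pvAltLoop rest true

def is_numeric_chapter_title_alt (text : String) : Bool :=
  pvAltLoop text.toList false

-- ===== PRECONDITION & SPEC =====
def Spec_is_numeric_chapter_title (text : String) (out : Bool) : Prop := out = is_numeric_chapter_title_alt text
instance (text : String) (out : Bool) : Decidable (Spec_is_numeric_chapter_title text out) := by unfold Spec_is_numeric_chapter_title; infer_instance

-- ===== CLAIM (what is proved, stated in full; the proofs are below) =====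
def Claim_equal_is_numeric_chapter_title : Prop := ∀ (text : String), Dom_is_numeric_chapter_title text → Spec_is_numeric_chapter_title text (is_numeric_chapter_title text)

-- ===== LEMMAS AND PROOFS =====

-- the Boolean predicate 'is not the dot', used to state the loop invariants
def pvNotDot (c : Char) : Bool := !(c == '.')

-- reference shape of Python's text.split(".") on a char list
def pvRef : List Char → List (List Char)
  | [] => [[]]
  | c :: rest => if c = '.' then [] :: pvRef rest else (pvRef rest).modifyHead (c :: ·)

theorem pvRef_ne_nil (l : List Char) : pvRef l ≠ [] := by
  induction l with
  | nil => simp [pvRef]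
  | cons c rest ih =>
    by_cases h : c = '.'
    · simp [pvRef, h]
    · cases hr : pvRef rest with
      | nil => exact absurd hr ih
      | cons a t => simp [pvRef, h, hr]

theorem length_pvRef (l : List Char) : (pvRef l).length = l.count '.' + 1 := by
  induction l with
  | nil => simp [pvRef]
  | cons c rest ih =>
    by_cases h : c = '.'
    · simp [pvRef, h, ih]
    · simp [pvRef, h, ih, List.length_modifyHead]

theorem headD_pvRef (l : List Char) : (pvRef l).headD [] = l.takeWhile pvNotDot := by
  induction l with
  | nil => simp [pvRef]
  | cons c rest ih =>
    by_cases h : c = '.'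
    · simp [pvRef, h, List.takeWhile, pvNotDot]
    · cases hr : pvRef rest with
      | nil => exact absurd hr (pvRef_ne_nil rest)
      | cons a t =>
        rw [hr] at ih
        simp only [List.headD_cons] at ih
        have hcb : (c == '.') = false := beq_eq_false_iff_ne.mpr h
        simp [pvRef, h, hr, List.takeWhile, pvNotDot, hcb, ih]

theorem pvGo_eq (fuel : Nat) : ∀ (l cur : List Char) (acc : List (List Char)),
    l.length < fuel →
    PySem.Chars.splitOn.go ['.'] fuel l cur acc
      = acc.reverse ++ (pvRef l).modifyHead (cur.reverse ++ ·) := by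
  induction fuel with
  | zero => intro l cur acc h; exact absurd h (by omega)
  | succ f ih =>
    intro l cur acc h
    cases l with
    | nil => simp [PySem.Chars.splitOn.go, pvRef]
    | cons c rest =>
      by_cases hc : c = '.'
      · subst hc
        rw [show PySem.Chars.splitOn.go ['.'] (f + 1) ('.' :: rest) cur acc
              = PySem.Chars.splitOn.go ['.'] f rest [] (cur.reverse :: acc) by
            simp [PySem.Chars.splitOn.go, List.isPrefixOf]]
        rw [ih rest [] _ (by simpa using h)]
        cases hr : pvRef rest with
        | nil => exact absurd hr (pvRef_ne_nil rest)
        | cons a t => simp [pvRef, hr]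
      · have hc' : ¬ '.' = c := fun hx => hc hx.symm
        rw [show PySem.Chars.splitOn.go ['.'] (f + 1) (c :: rest) cur acc
              = PySem.Chars.splitOn.go ['.'] f rest (c :: cur) acc by
            simp [PySem.Chars.splitOn.go, List.isPrefixOf, hc']]
        rw [ih rest (c :: cur) acc (by simpa using h)]
        cases hr : pvRef rest with
        | nil => exact absurd hr (pvRef_ne_nil rest)
        | cons a t => simp [pvRef, hc, hr]

theorem pvSplitOn_eq (cs : List Char) : PySem.Chars.splitOn cs ['.'] = pvRef cs := by
  rw [PySem.Chars.splitOn, pvGo_eq (cs.length + 1) cs [] [] (by omega)]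
  cases hr : pvRef cs with
  | nil => exact absurd hr (pvRef_ne_nil cs)
  | cons a t => simp

theorem pvPyGetD_zero (l : List (List Char)) (h : l ≠ []) :
    PySem.List.pyGetD l 0 [] = l.headD [] := by
  cases l with
  | nil => exact absurd rfl h
  | cons a t => simp [PySem.List.pyGetD, PySem.List.pyGet?, PySem.List.pyIdx?]

-- the automaton after the dot accepts iff no further dot occurs
theorem pvAltLoop_true (l : List Char) : pvAltLoop l true = !l.contains '.' := by
  induction l with
  | nil => simp [pvAltLoop]
  | cons c rest ih =>
    by_cases h : c = '.'
    · simp [pvAltLoop, h]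
    · simp [pvAltLoop, h, ih, Ne.symm h]

-- the automaton from the start: one dot present, Roman prefix, no dot after
theorem pvAltLoop_false (l : List Char) :
    pvAltLoop l false =
      (decide ('.' ∈ l) && pvLoopA (l.takeWhile pvNotDot)
        && !((l.dropWhile pvNotDot).tail.contains '.')) := by
  induction l with
  | nil => simp [pvAltLoop]
  | cons c rest ih =>
    by_cases h : c = '.'
    · simp [pvAltLoop, h, pvAltLoop_true, List.takeWhile, List.dropWhile, pvLoopA, pvNotDot]
    · have hne : c ≠ '.' := h
      by_cases hm : c ∈ (['I', 'V', 'X'] : List Char)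
      · have hcb : (c == '.') = false := beq_eq_false_iff_ne.mpr h
        simp [pvAltLoop, h, hm, ih, List.takeWhile, List.dropWhile, pvLoopA, pvNotDot, hcb, Ne.symm hne]
      · have hcb : (c == '.') = false := beq_eq_false_iff_ne.mpr h
        simp [pvAltLoop, h, hm, List.takeWhile, List.dropWhile, pvLoopA, pvNotDot, hcb]

-- dot count decomposes at the first dot
theorem pvCount_decomp (l : List Char) :
    l.count '.' = if '.' ∈ l then ((l.dropWhile pvNotDot).tail).count '.' + 1 else 0 := by
  induction l with
  | nil => simp
  | cons c rest ih =>
    by_cases h : c = '.'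
    · simp [h, List.dropWhile, pvNotDot]
    · have hcb : (c == '.') = false := beq_eq_false_iff_ne.mpr h
      simp [List.count_cons, h, Ne.symm h, List.dropWhile, pvNotDot, hcb, ih]

-- ===== VERDICT (by name: the statement is the Claim_ definition above) =====
theorem is_numeric_chapter_title_spec : Claim_equal_is_numeric_chapter_title := by
  intro text _
  unfold Spec_is_numeric_chapter_title is_numeric_chapter_title is_numeric_chapter_title_alt
  set cs := text.toList with hcs
  rw [pvSplitOn_eq]
  show (if (pvRef cs).length ≠ 2 then false
          else pvLoopA (PySem.List.pyGetD (pvRef cs) 0 [])) = _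
  rw [pvPyGetD_zero _ (pvRef_ne_nil cs), headD_pvRef, pvAltLoop_false]
  by_cases hm : '.' ∈ cs
  · by_cases ht : '.' ∈ (cs.dropWhile pvNotDot).tail
    · have hc : cs.count '.' ≠ 1 := by
        rw [pvCount_decomp]
        have := List.one_le_count_iff.mpr ht
        simp [hm]; omega
      have hlen : (pvRef cs).length ≠ 2 := by rw [length_pvRef]; omega
      simp [hlen, hm, ht]
    · have hc : cs.count '.' = 1 := by
        rw [pvCount_decomp]
        simp [hm, List.count_eq_zero.mpr ht]
      have hlen : (pvRef cs).length = 2 := by rw [length_pvRef, hc]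
      simp [hlen, hm, ht]
  · have hc : cs.count '.' = 0 := List.count_eq_zero.mpr hm
    have hlen : (pvRef cs).length ≠ 2 := by rw [length_pvRef, hc]; omega
    simp [hlen, hm]
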